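-- pv_equiv track=rewrite | github.com/irene-cj/weather-fit | app.py | get_outfit_items
-- ===== SOURCE A (Python) =====
-- def get_outfit_items(temp_f, condition):
--     cond     = condition.lower()
--     is_rainy = any(w in cond for w in ["rain", "drizzle", "shower", "storm"])
--     is_snowy = any(w in cond for w in ["snow", "blizzard", "sleet"])
--     is_windy = "wind" in cond
--     items    = []
--
--     # Top layer
--     if temp_f < 20:
--         items += ["Heavy winter coat", "Thick hoodie or crewneck", "Thermal undershirt"]
--     elif temp_f < 32:
--         items += ["Winter coat", "Hoodie or crewneck"]
--     elif temp_f < 45: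
--         items += ["Puffer jacket", "Hoodie or sweater"]
--     elif temp_f < 55:
--         items += ["Light jacket or denim jacket", "Long sleeve shirt"]
--     elif temp_f < 65:
--         items += ["Hoodie or cardigan"]
--     elif temp_f < 75:
--         items += ["T-shirt", "Light layer optional for evening"]
--     elif temp_f < 85:
--         items += ["T-shirt or tank top"]
--     else:
--         items += ["Tank top or sleeveless shirt"]
--
--     # Bottom
--     if temp_f < 32:
--         items += ["Thermal leggings under pants", "Warm pants or jeans"]
--     elif temp_f < 55:
--         items += ["Pants or jeans"]
--     elif temp_f < 70:
--         items += ["Jeans, pants, or chinos"]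
--     else:
--         items += ["Shorts or light pants"]
--
--     # Footwear
--     if temp_f < 32 or is_snowy:
--         items.append("Insulated waterproof boots")
--     elif temp_f < 55:
--         items.append("Closed-toe shoes or boots")
--     elif temp_f < 70:
--         items.append("Sneakers or casual shoes")
--     else:
--         items.append("Sneakers or sandals")
--
--     # Accessories
--     if temp_f < 20:
--         items += ["Gloves", "Beanie", "Scarf"]
--     elif temp_f < 32:
--         items += ["Gloves", "Beanie"]
--     elif temp_f < 45:
--         items.append("Scarf optional")
--
--     if is_rainy:  items.append("☂️ Umbrella or rain jacket")
--     if is_snowy:  items.append("❄️ Waterproof outer layer")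
--     if is_windy and temp_f < 60:
--         items.append("💨 Wind-resistant jacket")
--
--     return items
-- ===== SOURCE B (Python) =====
-- _RULES = [
--     ("Heavy winter coat",                lambda t, r, s, w: t < 20),
--     ("Thick hoodie or crewneck",         lambda t, r, s, w: t < 20),
--     ("Thermal undershirt",               lambda t, r, s, w: t < 20),
--     ("Winter coat",                      lambda t, r, s, w: 20 <= t < 32),
--     ("Hoodie or crewneck",               lambda t, r, s, w: 20 <= t < 32),
--     ("Puffer jacket",                    lambda t, r, s, w: 32 <= t < 45),
--     ("Hoodie or sweater",                lambda t, r, s, w: 32 <= t < 45),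
--     ("Light jacket or denim jacket",     lambda t, r, s, w: 45 <= t < 55),
--     ("Long sleeve shirt",                lambda t, r, s, w: 45 <= t < 55),
--     ("Hoodie or cardigan",               lambda t, r, s, w: 55 <= t < 65),
--     ("T-shirt",                          lambda t, r, s, w: 65 <= t < 75),
--     ("Light layer optional for evening", lambda t, r, s, w: 65 <= t < 75),
--     ("T-shirt or tank top",              lambda t, r, s, w: 75 <= t < 85),
--     ("Tank top or sleeveless shirt",     lambda t, r, s, w: 85 <= t),
--     ("Thermal leggings under pants",     lambda t, r, s, w: t < 32),
--     ("Warm pants or jeans",              lambda t, r, s, w: t < 32),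
--     ("Pants or jeans",                   lambda t, r, s, w: 32 <= t < 55),
--     ("Jeans, pants, or chinos",          lambda t, r, s, w: 55 <= t < 70),
--     ("Shorts or light pants",            lambda t, r, s, w: 70 <= t),
--     ("Insulated waterproof boots",       lambda t, r, s, w: t < 32 or s),
--     ("Closed-toe shoes or boots",        lambda t, r, s, w: 32 <= t < 55 and not s),
--     ("Sneakers or casual shoes",         lambda t, r, s, w: 55 <= t < 70 and not s),
--     ("Sneakers or sandals",              lambda t, r, s, w: 70 <= t and not s),
--     ("Gloves",                           lambda t, r, s, w: t < 32),
--     ("Beanie",                           lambda t, r, s, w: t < 32),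
--     ("Scarf",                            lambda t, r, s, w: t < 20),
--     ("Scarf optional",                   lambda t, r, s, w: 32 <= t < 45),
--     ("\u2602\ufe0f Umbrella or rain jacket", lambda t, r, s, w: r),
--     ("\u2744\ufe0f Waterproof outer layer",  lambda t, r, s, w: s),
--     ("\U0001f4a8 Wind-resistant jacket",     lambda t, r, s, w: w and t < 60),
-- ]
--
-- def get_outfit_items(temp_f, condition):
--     cond = condition.lower()
--     is_rainy = any(k in cond for k in ("rain", "drizzle", "shower", "storm"))
--     is_snowy = any(k in cond for k in ("snow", "blizzard", "sleet"))
--     is_windy = "wind" in cond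
--     return [item for item, ok in _RULES if ok(temp_f, is_rainy, is_snowy, is_windy)]
-- ===== Notes on version B (the rewrite author's own statement) =====
-- stated objective: alternative
-- what changed: Replaces A's four mutually-exclusive if/elif branch ladders by a flat decision table of per-item (item, predicate) rules with explicit interval/flag conditions, producing the output as one filter pass over the rules.
import Mathlib
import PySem

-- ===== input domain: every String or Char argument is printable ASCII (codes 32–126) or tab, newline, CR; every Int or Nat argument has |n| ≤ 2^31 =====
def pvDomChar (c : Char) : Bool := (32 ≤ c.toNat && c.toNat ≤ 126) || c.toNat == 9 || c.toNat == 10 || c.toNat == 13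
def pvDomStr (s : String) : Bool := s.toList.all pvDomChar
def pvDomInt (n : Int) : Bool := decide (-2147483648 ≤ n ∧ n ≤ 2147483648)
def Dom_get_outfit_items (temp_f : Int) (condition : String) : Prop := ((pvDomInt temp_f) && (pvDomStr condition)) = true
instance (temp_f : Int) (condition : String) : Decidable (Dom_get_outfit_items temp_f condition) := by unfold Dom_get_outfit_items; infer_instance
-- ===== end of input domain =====

-- B flattens A's four mutually-exclusive branch ladders into one filter over per-item
-- (item, predicate) rules with explicit interval conditions (objective: alternative); same value.

-- ===== PORT A =====
def get_outfit_items (temp_f : Int) (condition : String) : List String :=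
  let cond := PySem.Str.lower condition
  let is_rainy := PySem.Str.isIn "rain" cond || PySem.Str.isIn "drizzle" cond ||
                  PySem.Str.isIn "shower" cond || PySem.Str.isIn "storm" cond
  let is_snowy := PySem.Str.isIn "snow" cond || PySem.Str.isIn "blizzard" cond ||
                  PySem.Str.isIn "sleet" cond
  let is_windy := PySem.Str.isIn "wind" cond
  let items : List String := []
  -- Top layer
  let items := items ++
    (if temp_f < 20 then ["Heavy winter coat", "Thick hoodie or crewneck", "Thermal undershirt"]
     else if temp_f < 32 then ["Winter coat", "Hoodie or crewneck"]
     else if temp_f < 45 then ["Puffer jacket", "Hoodie or sweater"]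
     else if temp_f < 55 then ["Light jacket or denim jacket", "Long sleeve shirt"]
     else if temp_f < 65 then ["Hoodie or cardigan"]
     else if temp_f < 75 then ["T-shirt", "Light layer optional for evening"]
     else if temp_f < 85 then ["T-shirt or tank top"]
     else ["Tank top or sleeveless shirt"])
  -- Bottom
  let items := items ++
    (if temp_f < 32 then ["Thermal leggings under pants", "Warm pants or jeans"]
     else if temp_f < 55 then ["Pants or jeans"]
     else if temp_f < 70 then ["Jeans, pants, or chinos"]
     else ["Shorts or light pants"])
  -- Footwear
  let items := items ++
    (if temp_f < 32 || is_snowy then ["Insulated waterproof boots"]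
     else if temp_f < 55 then ["Closed-toe shoes or boots"]
     else if temp_f < 70 then ["Sneakers or casual shoes"]
     else ["Sneakers or sandals"])
  -- Accessories
  let items := items ++
    (if temp_f < 20 then ["Gloves", "Beanie", "Scarf"]
     else if temp_f < 32 then ["Gloves", "Beanie"]
     else if temp_f < 45 then ["Scarf optional"]
     else [])
  let items := items ++ (if is_rainy then ["☂️ Umbrella or rain jacket"] else [])
  let items := items ++ (if is_snowy then ["❄️ Waterproof outer layer"] else [])
  let items := items ++ (if is_windy && temp_f < 60 then ["💨 Wind-resistant jacket"] else [])
  items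

-- ===== PORT B =====
def pvRules : List (String × (Int → Bool → Bool → Bool → Bool)) :=
  [("Heavy winter coat",                fun t _ _ _ => decide (t < 20)),
   ("Thick hoodie or crewneck",         fun t _ _ _ => decide (t < 20)),
   ("Thermal undershirt",               fun t _ _ _ => decide (t < 20)),
   ("Winter coat",                      fun t _ _ _ => decide (20 ≤ t) && decide (t < 32)),
   ("Hoodie or crewneck",               fun t _ _ _ => decide (20 ≤ t) && decide (t < 32)),
   ("Puffer jacket",                    fun t _ _ _ => decide (32 ≤ t) && decide (t < 45)),
   ("Hoodie or sweater",                fun t _ _ _ => decide (32 ≤ t) && decide (t < 45)),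
   ("Light jacket or denim jacket",     fun t _ _ _ => decide (45 ≤ t) && decide (t < 55)),
   ("Long sleeve shirt",                fun t _ _ _ => decide (45 ≤ t) && decide (t < 55)),
   ("Hoodie or cardigan",               fun t _ _ _ => decide (55 ≤ t) && decide (t < 65)),
   ("T-shirt",                          fun t _ _ _ => decide (65 ≤ t) && decide (t < 75)),
   ("Light layer optional for evening", fun t _ _ _ => decide (65 ≤ t) && decide (t < 75)),
   ("T-shirt or tank top",              fun t _ _ _ => decide (75 ≤ t) && decide (t < 85)),
   ("Tank top or sleeveless shirt",     fun t _ _ _ => decide (85 ≤ t)),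
   ("Thermal leggings under pants",     fun t _ _ _ => decide (t < 32)),
   ("Warm pants or jeans",              fun t _ _ _ => decide (t < 32)),
   ("Pants or jeans",                   fun t _ _ _ => decide (32 ≤ t) && decide (t < 55)),
   ("Jeans, pants, or chinos",          fun t _ _ _ => decide (55 ≤ t) && decide (t < 70)),
   ("Shorts or light pants",            fun t _ _ _ => decide (70 ≤ t)),
   ("Insulated waterproof boots",       fun t _ s _ => decide (t < 32) || s),
   ("Closed-toe shoes or boots",        fun t _ s _ => (decide (32 ≤ t) && decide (t < 55)) && !s),
   ("Sneakers or casual shoes",         fun t _ s _ => (decide (55 ≤ t) && decide (t < 70)) && !s),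
   ("Sneakers or sandals",              fun t _ s _ => decide (70 ≤ t) && !s),
   ("Gloves",                           fun t _ _ _ => decide (t < 32)),
   ("Beanie",                           fun t _ _ _ => decide (t < 32)),
   ("Scarf",                            fun t _ _ _ => decide (t < 20)),
   ("Scarf optional",                   fun t _ _ _ => decide (32 ≤ t) && decide (t < 45)),
   ("☂️ Umbrella or rain jacket",        fun _ r _ _ => r),
   ("❄️ Waterproof outer layer",         fun _ _ s _ => s),
   ("💨 Wind-resistant jacket",          fun t _ _ w => w && decide (t < 60))]

def get_outfit_items_alt (temp_f : Int) (condition : String) : List String :=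
  let cond := PySem.Str.lower condition
  let is_rainy := PySem.Str.isIn "rain" cond || PySem.Str.isIn "drizzle" cond ||
                  PySem.Str.isIn "shower" cond || PySem.Str.isIn "storm" cond
  let is_snowy := PySem.Str.isIn "snow" cond || PySem.Str.isIn "blizzard" cond ||
                  PySem.Str.isIn "sleet" cond
  let is_windy := PySem.Str.isIn "wind" cond
  (pvRules.filter (fun p => p.2 temp_f is_rainy is_snowy is_windy)).map (fun p => p.1)

-- ===== PRECONDITION & SPEC =====
def Spec_get_outfit_items (temp_f : Int) (condition : String) (out : List String) : Prop := out = get_outfit_items_alt temp_f condition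
instance (temp_f : Int) (condition : String) (out : List String) : Decidable (Spec_get_outfit_items temp_f condition out) := by unfold Spec_get_outfit_items; infer_instance

-- ===== CLAIM (what is proved, stated in full; the proofs are below) =====
def Claim_equal_get_outfit_items : Prop := ∀ (temp_f : Int) (condition : String), Dom_get_outfit_items temp_f condition → Spec_get_outfit_items temp_f condition (get_outfit_items temp_f condition)

-- ===== LEMMAS AND PROOFS =====
-- The rule table, cut into its five sections (proof-only helpers).
def pvTopR : List (String × (Int → Bool → Bool → Bool → Bool)) := pvRules.take 14
def pvBotR : List (String × (Int → Bool → Bool → Bool → Bool)) := (pvRules.drop 14).take 5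
def pvFootR : List (String × (Int → Bool → Bool → Bool → Bool)) := (pvRules.drop 19).take 4
def pvAccR : List (String × (Int → Bool → Bool → Bool → Bool)) := (pvRules.drop 23).take 4
def pvExtraR : List (String × (Int → Bool → Bool → Bool → Bool)) := pvRules.drop 27

theorem pvRules_split : pvRules = pvTopR ++ pvBotR ++ pvFootR ++ pvAccR ++ pvExtraR := rfl

theorem pvTop_eval (t : Int) (r s w : Bool) :
    ((pvTopR.filter (fun p => p.2 t r s w)).map (fun p => p.1)) =
    (if t < 20 then ["Heavy winter coat", "Thick hoodie or crewneck", "Thermal undershirt"]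
     else if t < 32 then ["Winter coat", "Hoodie or crewneck"]
     else if t < 45 then ["Puffer jacket", "Hoodie or sweater"]
     else if t < 55 then ["Light jacket or denim jacket", "Long sleeve shirt"]
     else if t < 65 then ["Hoodie or cardigan"]
     else if t < 75 then ["T-shirt", "Light layer optional for evening"]
     else if t < 85 then ["T-shirt or tank top"]
     else ["Tank top or sleeveless shirt"]) := by
  rcases (by omega : t < 20 ∨ 20 ≤ t) with h1 | h1
  · simp [pvTopR, pvRules, h1, show t < 32 by omega, show ¬(20 ≤ t) by omega,
      show ¬(32 ≤ t) by omega, show ¬(45 ≤ t) by omega, show ¬(55 ≤ t) by omega,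
      show ¬(65 ≤ t) by omega, show ¬(75 ≤ t) by omega, show ¬(85 ≤ t) by omega]
  rcases (by omega : t < 32 ∨ 32 ≤ t) with h2 | h2
  · simp [pvTopR, pvRules, h1, h2, show ¬(t < 20) by omega, show ¬(32 ≤ t) by omega,
      show ¬(45 ≤ t) by omega, show ¬(55 ≤ t) by omega, show ¬(65 ≤ t) by omega,
      show ¬(75 ≤ t) by omega, show ¬(85 ≤ t) by omega]
  rcases (by omega : t < 45 ∨ 45 ≤ t) with h3 | h3
  · simp [pvTopR, pvRules, h2, h3, show ¬(t < 20) by omega, show ¬(t < 32) by omega,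
      show ¬(45 ≤ t) by omega, show ¬(55 ≤ t) by omega, show ¬(65 ≤ t) by omega,
      show ¬(75 ≤ t) by omega, show ¬(85 ≤ t) by omega]
  rcases (by omega : t < 55 ∨ 55 ≤ t) with h4 | h4
  · simp [pvTopR, pvRules, h3, h4, show ¬(t < 20) by omega, show ¬(t < 32) by omega,
      show ¬(t < 45) by omega, show ¬(55 ≤ t) by omega, show ¬(65 ≤ t) by omega,
      show ¬(75 ≤ t) by omega, show ¬(85 ≤ t) by omega]
  rcases (by omega : t < 65 ∨ 65 ≤ t) with h5 | h5
  · simp [pvTopR, pvRules, h4, h5, show ¬(t < 20) by omega, show ¬(t < 32) by omega,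
      show ¬(t < 45) by omega, show ¬(t < 55) by omega, show ¬(65 ≤ t) by omega,
      show ¬(75 ≤ t) by omega, show ¬(85 ≤ t) by omega]
  rcases (by omega : t < 75 ∨ 75 ≤ t) with h6 | h6
  · simp [pvTopR, pvRules, h5, h6, show ¬(t < 20) by omega, show ¬(t < 32) by omega,
      show ¬(t < 45) by omega, show ¬(t < 55) by omega, show ¬(t < 65) by omega,
      show ¬(75 ≤ t) by omega, show ¬(85 ≤ t) by omega]
  rcases (by omega : t < 85 ∨ 85 ≤ t) with h7 | h7
  · simp [pvTopR, pvRules, h6, h7, show ¬(t < 20) by omega, show ¬(t < 32) by omega,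
      show ¬(t < 45) by omega, show ¬(t < 55) by omega, show ¬(t < 65) by omega,
      show ¬(t < 75) by omega, show ¬(85 ≤ t) by omega]
  · simp [pvTopR, pvRules, h7, show ¬(t < 20) by omega, show ¬(t < 32) by omega,
      show ¬(t < 45) by omega, show ¬(t < 55) by omega, show ¬(t < 65) by omega,
      show ¬(t < 75) by omega, show ¬(t < 85) by omega]

theorem pvBot_eval (t : Int) (r s w : Bool) :
    ((pvBotR.filter (fun p => p.2 t r s w)).map (fun p => p.1)) =
    (if t < 32 then ["Thermal leggings under pants", "Warm pants or jeans"]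
     else if t < 55 then ["Pants or jeans"]
     else if t < 70 then ["Jeans, pants, or chinos"]
     else ["Shorts or light pants"]) := by
  rcases (by omega : t < 32 ∨ 32 ≤ t) with h1 | h1
  · simp [pvBotR, pvRules, h1, show ¬(32 ≤ t) by omega, show ¬(55 ≤ t) by omega,
      show ¬(70 ≤ t) by omega]
  rcases (by omega : t < 55 ∨ 55 ≤ t) with h2 | h2
  · simp [pvBotR, pvRules, h1, h2, show ¬(t < 32) by omega, show ¬(55 ≤ t) by omega,
      show ¬(70 ≤ t) by omega]
  rcases (by omega : t < 70 ∨ 70 ≤ t) with h3 | h3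
  · simp [pvBotR, pvRules, h2, h3, show ¬(t < 32) by omega, show ¬(t < 55) by omega,
      show ¬(70 ≤ t) by omega]
  · simp [pvBotR, pvRules, h3, show ¬(t < 32) by omega, show ¬(t < 55) by omega,
      show ¬(t < 70) by omega]

theorem pvFoot_eval (t : Int) (r s w : Bool) :
    ((pvFootR.filter (fun p => p.2 t r s w)).map (fun p => p.1)) =
    (if t < 32 || s then ["Insulated waterproof boots"]
     else if t < 55 then ["Closed-toe shoes or boots"]
     else if t < 70 then ["Sneakers or casual shoes"]
     else ["Sneakers or sandals"]) := by
  cases s <;> (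
    rcases (by omega : t < 32 ∨ 32 ≤ t) with h1 | h1
    · simp [pvFootR, pvRules, h1, show ¬(32 ≤ t) by omega, show ¬(55 ≤ t) by omega,
        show ¬(70 ≤ t) by omega]
    rcases (by omega : t < 55 ∨ 55 ≤ t) with h2 | h2
    · simp [pvFootR, pvRules, h1, h2, show ¬(t < 32) by omega, show ¬(55 ≤ t) by omega,
        show ¬(70 ≤ t) by omega]
    rcases (by omega : t < 70 ∨ 70 ≤ t) with h3 | h3
    · simp [pvFootR, pvRules, h2, h3, show ¬(t < 32) by omega, show ¬(t < 55) by omega,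
        show ¬(70 ≤ t) by omega]
    · simp [pvFootR, pvRules, h3, show ¬(t < 32) by omega, show ¬(t < 55) by omega,
        show ¬(t < 70) by omega])

theorem pvAcc_eval (t : Int) (r s w : Bool) :
    ((pvAccR.filter (fun p => p.2 t r s w)).map (fun p => p.1)) =
    (if t < 20 then ["Gloves", "Beanie", "Scarf"]
     else if t < 32 then ["Gloves", "Beanie"]
     else if t < 45 then ["Scarf optional"]
     else []) := by
  rcases (by omega : t < 20 ∨ 20 ≤ t) with h1 | h1
  · simp [pvAccR, pvRules, h1, show t < 32 by omega, show ¬(32 ≤ t) by omega]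
  rcases (by omega : t < 32 ∨ 32 ≤ t) with h2 | h2
  · simp [pvAccR, pvRules, h2, show ¬(t < 20) by omega, show ¬(32 ≤ t) by omega]
  rcases (by omega : t < 45 ∨ 45 ≤ t) with h3 | h3
  · simp [pvAccR, pvRules, h2, h3, show ¬(t < 20) by omega, show ¬(t < 32) by omega]
  · simp [pvAccR, pvRules, show ¬(t < 20) by omega, show ¬(t < 32) by omega,
      show ¬(t < 45) by omega]

theorem pvExtra_eval (t : Int) (r s w : Bool) :
    ((pvExtraR.filter (fun p => p.2 t r s w)).map (fun p => p.1)) =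
    ((if r then ["☂️ Umbrella or rain jacket"] else []) ++
     (if s then ["❄️ Waterproof outer layer"] else []) ++
     (if w && t < 60 then ["💨 Wind-resistant jacket"] else [])) := by
  rcases (by omega : t < 60 ∨ 60 ≤ t) with h | h <;>
    cases r <;> cases s <;> cases w <;>
      simp_all [pvExtraR, pvRules]

-- ===== VERDICT (by name: the statement is the Claim_ definition above) =====
set_option maxHeartbeats 2000000 in
theorem get_outfit_items_spec : Claim_equal_get_outfit_items := by
  intro t c _
  unfold Spec_get_outfit_items get_outfit_items get_outfit_items_alt
  rw [pvRules_split]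
  simp only [List.filter_append, List.map_append]
  rw [pvTop_eval, pvBot_eval, pvFoot_eval, pvAcc_eval, pvExtra_eval]
  simp only [List.nil_append, List.append_assoc]
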